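-- pv_equiv track=rewrite | github.com/jpmarques19/amora-os | sdk/amora_sdk/device/broker/client.py | _topic_matches_subscription
-- ===== SOURCE A (Python) =====
-- def _topic_matches_subscription(subscription: str, topic: str) -> bool:
--     """
--     Check if a topic matches a subscription pattern.
--
--     Args:
--         subscription: Subscription pattern
--         topic: Topic to check
--
--     Returns:
--         True if the topic matches the subscription, False otherwise
--     """
--     # Split the subscription and topic into parts
--     subscription_parts = subscription.split('/')
--     topic_parts = topic.split('/')
--
--     # If the subscription has more parts than the topic, it can't match
--     if len(subscription_parts) > len(topic_parts) and '#' not in subscription_parts: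
--         return False
--
--     # Check each part
--     for i, sub_part in enumerate(subscription_parts):
--         # If we've reached the end of the topic parts, the subscription can only match if it ends with #
--         if i >= len(topic_parts):
--             return sub_part == '#'
--
--         # If the subscription part is #, it matches the rest of the topic
--         if sub_part == '#':
--             return True
--
--         # If the subscription part is +, it matches any single part
--         if sub_part == '+':
--             continue
--
--         # Otherwise, the parts must match exactly
--         if sub_part != topic_parts[i]:
--             return False
--
--     # If we've checked all subscription parts and haven't returned yet,
--     # the subscription matches if it has the same number of parts as the topic
--     return len(subscription_parts) == len(topic_parts)
-- ===== SOURCE B (Python) =====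
-- def _topic_matches_subscription(subscription: str, topic: str) -> bool:
--     """Recursive matcher over the part lists; same result as the loop version."""
--     def match_parts(sub_parts, topic_parts):
--         if not sub_parts:
--             return not topic_parts
--         head = sub_parts[0]
--         if not topic_parts:
--             return head == '#'
--         if head == '#':
--             return True
--         if head == '+' or head == topic_parts[0]:
--             return match_parts(sub_parts[1:], topic_parts[1:])
--         return False
--     return match_parts(subscription.split('/'), topic.split('/'))
-- ===== Notes on version B (the rewrite author's own statement) =====
-- stated objective: simpler
-- what changed: Replaces the index-driven for-loop with its redundant leading length guard and trailing length-equality check by a direct structural recursion over the two part lists, whose base cases subsume both checks.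
import Mathlib
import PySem

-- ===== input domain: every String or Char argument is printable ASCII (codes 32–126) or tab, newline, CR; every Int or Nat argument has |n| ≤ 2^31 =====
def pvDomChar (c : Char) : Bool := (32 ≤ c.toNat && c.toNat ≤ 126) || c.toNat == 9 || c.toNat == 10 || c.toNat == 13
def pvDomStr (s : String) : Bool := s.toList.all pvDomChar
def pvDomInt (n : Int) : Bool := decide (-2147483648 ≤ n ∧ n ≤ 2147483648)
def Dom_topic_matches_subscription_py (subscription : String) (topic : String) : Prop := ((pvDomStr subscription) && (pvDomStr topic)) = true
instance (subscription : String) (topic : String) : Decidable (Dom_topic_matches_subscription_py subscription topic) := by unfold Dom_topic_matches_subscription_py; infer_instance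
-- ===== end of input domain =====

-- B replaces A's index-driven loop (with its leading length guard and trailing
-- length-equality check) by a direct structural recursion over the two part lists: simpler.

-- ===== PORT A =====
-- the for-loop over subscription_parts, carrying the index i; some b = an early return, none = fell through
def pvLoopA (tps : List String) : List String → Nat → Option Bool
  | [], _ => none
  | sub :: rest, i =>
    if tps.length ≤ i then some (sub == "#")
    else if sub == "#" then some true
    else if sub == "+" then pvLoopA tps rest (i + 1)
    -- topic_parts[i]: the branch guard gives i < tps.length, so the in-range Python index is getD
    else if sub != tps.getD i "" then some false
    else pvLoopA tps rest (i + 1)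

def topic_matches_subscription_py (subscription : String) (topic : String) : Bool :=
  let subscription_parts := (PySem.Str.split? subscription "/").getD []
  let topic_parts := (PySem.Str.split? topic "/").getD []
  if topic_parts.length < subscription_parts.length ∧ "#" ∉ subscription_parts then false
  else
    match pvLoopA topic_parts subscription_parts 0 with
    | some b => b
    | none => subscription_parts.length == topic_parts.length

-- ===== PORT B =====
def pvMatchParts : List String → List String → Bool
  | [], tps => tps.isEmpty
  | head :: rest, tps =>
    match tps with
    | [] => head == "#"
    | th :: tt =>
      if head == "#" then true
      else if head == "+" || head == th then pvMatchParts rest tt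
      else false

def topic_matches_subscription_py_alt (subscription : String) (topic : String) : Bool :=
  pvMatchParts ((PySem.Str.split? subscription "/").getD []) ((PySem.Str.split? topic "/").getD [])

-- ===== PRECONDITION & SPEC =====
def Spec_topic_matches_subscription_py (subscription : String) (topic : String) (out : Bool) : Prop := out = topic_matches_subscription_py_alt subscription topic
instance (subscription : String) (topic : String) (out : Bool) : Decidable (Spec_topic_matches_subscription_py subscription topic out) := by unfold Spec_topic_matches_subscription_py; infer_instance

-- ===== CLAIM (what is proved, stated in full; the proofs are below) =====
def Claim_equal_topic_matches_subscription_py : Prop := ∀ (subscription : String) (topic : String), Dom_topic_matches_subscription_py subscription topic → Spec_topic_matches_subscription_py subscription topic (topic_matches_subscription_py subscription topic)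

-- ===== LEMMAS AND PROOFS =====

-- the loop (with its fall-through length check) computes the recursion on the dropped topic list
theorem pvLoopA_eq_match (tps : List String) (sps : List String) (i : Nat) (hi : i ≤ tps.length) :
    (match pvLoopA tps sps i with
     | some b => b
     | none => (i + sps.length == tps.length)) = pvMatchParts sps (tps.drop i) := by
  induction sps generalizing i with
  | nil =>
    by_cases h : tps.length ≤ i
    · have hieq : i = tps.length := le_antisymm hi h
      simp [pvLoopA, pvMatchParts, hieq]
    · have hne : i ≠ tps.length := by omega
      have hlt : i < tps.length := by omega
      have hb : (i == tps.length) = false := by simp [hne]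
      rw [List.drop_eq_getElem_cons hlt]
      simp [pvLoopA, pvMatchParts, hb]
      omega
  | cons sub rest ih =>
    by_cases hlen : tps.length ≤ i
    · have hieq : i = tps.length := le_antisymm hi hlen
      have hnil : tps.drop i = [] := by simp [hieq]
      simp [pvLoopA, hlen, hnil, pvMatchParts]
    · have hlt : i < tps.length := by omega
      have hdrop : tps.drop i = tps[i] :: tps.drop (i + 1) := List.drop_eq_getElem_cons hlt
      have hgetD : tps[i]?.getD "" = tps[i] := by simp [List.getElem?_eq_getElem hlt]
      rw [hdrop]
      simp only [pvLoopA, pvMatchParts, if_neg hlen, List.getD_eq_getElem?_getD, hgetD]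
      by_cases hhash : sub = "#"
      · simp [hhash]
      · rw [if_neg (by simp [hhash] : ¬ (sub == "#") = true),
          if_neg (by simp [hhash] : ¬ (sub == "#") = true)]
        by_cases hplus : sub = "+"
        · rw [if_pos (by simp [hplus] : (sub == "+") = true),
            if_pos (by simp [hplus] : (sub == "+" || sub == tps[i]) = true),
            (by simp; omega : i + (sub :: rest).length = i + 1 + rest.length)]
          exact ih (i + 1) (by omega)
        · rw [if_neg (by simp [hplus] : ¬ (sub == "+") = true)]
          by_cases heq : sub = tps[i]
          · rw [if_neg (by simp [heq] : ¬ (sub != tps[i]) = true),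
              if_pos (by simp [heq] : (sub == "+" || sub == tps[i]) = true),
              (by simp; omega : i + (sub :: rest).length = i + 1 + rest.length)]
            exact ih (i + 1) (by omega)
          · rw [if_pos (by simp [heq] : (sub != tps[i]) = true),
              if_neg (by simp [hplus, heq] : ¬ (sub == "+" || sub == tps[i]) = true)]

-- with the guard's hypotheses (sub longer, no '#'), the recursion is false anyway
theorem pvMatchParts_false_of_longer (sps tps : List String)
    (hlen : tps.length < sps.length) (hhash : "#" ∉ sps) : pvMatchParts sps tps = false := by
  induction sps generalizing tps with
  | nil => simp at hlen
  | cons sub rest ih =>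
    have hsub : sub ≠ "#" := fun h => hhash (h ▸ List.mem_cons_self ..)
    have hrest : "#" ∉ rest := fun h => hhash (List.mem_cons_of_mem _ h)
    cases tps with
    | nil => simp [pvMatchParts, hsub]
    | cons th tt =>
      simp only [pvMatchParts, if_neg (by simp [hsub] : ¬ (sub == "#") = true)]
      split
      · exact ih tt (by simpa using hlen) hrest
      · rfl

-- ===== VERDICT (by name: the statement is the Claim_ definition above) =====
theorem topic_matches_subscription_py_spec : Claim_equal_topic_matches_subscription_py := by
  intro subscription topic _
  unfold Spec_topic_matches_subscription_py topic_matches_subscription_py topic_matches_subscription_py_alt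
  generalize (PySem.Str.split? subscription "/").getD [] = sps
  generalize (PySem.Str.split? topic "/").getD [] = tps
  by_cases hguard : tps.length < sps.length ∧ "#" ∉ sps
  · rw [if_pos hguard]
    exact (pvMatchParts_false_of_longer sps tps hguard.1 hguard.2).symm
  · rw [if_neg hguard]
    simpa using pvLoopA_eq_match tps sps 0 (Nat.zero_le _)
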